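-- pv_equiv track=rewrite | github.com/glorisonlai/BottlePourer | blah.py | gen_checksum
-- ===== SOURCE A (Python) =====
-- def gen_checksum(bottles):
--     checksum = 0
--     for bottle in bottles:
--         bottle_checksum = 1
--         for i, letter in enumerate(bottle):
--             bottle_checksum *= (ord(letter)) ** (i + 1)
--         checksum += bottle_checksum
--     return checksum % 2111379
-- ===== SOURCE B (Python) =====
-- M = 2111379
--
-- def gen_checksum(bottles):
--     # Uses the telescoping identity  prod_i ord(c_i)**(i+1) = prod_j (product of ord
--     # over the suffix starting at j): scan each bottle right-to-left keeping the
--     # running suffix product, and multiply those into the accumulator -- no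
--     # exponentiation at all, everything reduced mod M.
--     total = 0
--     for bottle in bottles:
--         suf = 1
--         acc = 1
--         for ch in reversed(bottle):
--             suf = suf * ord(ch) % M
--             acc = acc * suf % M
--         total = (total + acc) % M
--     return total
-- ===== Notes on version B (the rewrite author's own statement) =====
-- stated objective: alternative
-- what changed: B replaces per-position exponentiation by the telescoping identity prod_i ord(c_i)^(i+1) = prod over j of the suffix product starting at j: a single right-to-left scan maintaining the running suffix product, with every product and sum reduced mod 2111379, instead of A's exact bignum powers with one final mod.
import Mathlib
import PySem

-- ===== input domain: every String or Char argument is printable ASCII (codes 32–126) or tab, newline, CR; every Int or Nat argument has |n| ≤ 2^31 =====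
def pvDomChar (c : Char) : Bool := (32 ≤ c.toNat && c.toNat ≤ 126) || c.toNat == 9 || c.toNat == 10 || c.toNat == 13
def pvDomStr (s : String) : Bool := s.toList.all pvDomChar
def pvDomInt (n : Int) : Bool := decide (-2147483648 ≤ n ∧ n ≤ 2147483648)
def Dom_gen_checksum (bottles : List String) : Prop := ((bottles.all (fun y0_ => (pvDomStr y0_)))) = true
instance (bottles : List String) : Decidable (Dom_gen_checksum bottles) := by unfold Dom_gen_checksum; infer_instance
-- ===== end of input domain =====

-- B replaces A's positional exponentiation and exact bignum products (one final mod) by the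
-- telescoping identity "product of ord^(i+1) = product of suffix products": one right-to-left
-- scan per bottle with a running suffix product, all arithmetic reduced mod 2111379 (objective: alternative).

-- ===== PORT A =====
def gen_checksum (bottles : List String) : Int :=
  PySem.Int.mod
    (bottles.foldl
      (fun checksum bottle =>
        checksum +
          (PySem.List.enumerate bottle.toList).foldl
            (fun bottle_checksum p =>
              bottle_checksum * (p.2.toNat : Int) ^ (p.1 + 1).toNat) 1) 0)
    2111379

-- ===== PORT B =====
def gen_checksum_alt (bottles : List String) : Int :=
  bottles.foldl
    (fun total bottle =>
      PySem.Int.mod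
        (total +
          (bottle.toList.reverse.foldl
            (fun st ch =>
              let suf := PySem.Int.mod (st.1 * (ch.toNat : Int)) 2111379
              (suf, PySem.Int.mod (st.2 * suf) 2111379))
            ((1 : Int), (1 : Int))).2)
        2111379) 0

-- ===== PRECONDITION & SPEC =====
def Spec_gen_checksum (bottles : List String) (out : Int) : Prop := out = gen_checksum_alt bottles
instance (bottles : List String) (out : Int) : Decidable (Spec_gen_checksum bottles out) := by unfold Spec_gen_checksum; infer_instance

-- ===== CLAIM =====
def Claim_equal_gen_checksum : Prop := ∀ (bottles : List String), Dom_gen_checksum bottles → Spec_gen_checksum bottles (gen_checksum bottles)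

-- ===== LEMMAS AND PROOFS =====

-- Two modular-arithmetic absorption facts used throughout.
lemma pv_mml (a b : Int) : (a % 2111379) * b % 2111379 = a * b % 2111379 := by
  conv_lhs => rw [Int.mul_emod, Int.emod_emod_of_dvd _ dvd_rfl, ← Int.mul_emod]

lemma pv_mmr (a b : Int) : a * (b % 2111379) % 2111379 = a * b % 2111379 := by
  conv_lhs => rw [Int.mul_emod, Int.emod_emod_of_dvd _ dvd_rfl, ← Int.mul_emod]

-- Exact (no-mod) value of A's inner fold: a * ∏ c_i ^ (s+i+1).
def pvProd (cs : List Char) (s : Int) : Int :=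
  match cs with
  | [] => 1
  | c :: cs => (c.toNat : Int) ^ (s + 1).toNat * pvProd cs (s + 1)

lemma pv_A_inner (cs : List Char) : ∀ (s a : Int),
    (PySem.List.enumerate cs s).foldl
      (fun bottle_checksum p => bottle_checksum * (p.2.toNat : Int) ^ (p.1 + 1).toNat) a
    = a * pvProd cs s := by
  induction cs with
  | nil => intro s a; simp [PySem.List.enumerate, pvProd]
  | cons c cs ih =>
    intro s a
    rw [PySem.List.enumerate_cons, List.foldl_cons, ih, pvProd]
    ring

lemma pv_prod_append (c : Char) (xs : List Char) : ∀ (s : Int), 0 ≤ s →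
    pvProd (xs ++ [c]) s = pvProd xs s * (c.toNat : Int) ^ (s + xs.length + 1).toNat := by
  induction xs with
  | nil => intro s _; simp [pvProd]
  | cons x xs ih =>
    intro s hs
    have h2 : (s + ((x :: xs).length : Int) + 1).toNat = (s + 1 + (xs.length : Int) + 1).toNat := by
      simp only [List.length_cons]; push_cast; omega
    calc pvProd ((x :: xs) ++ [c]) s
        = (x.toNat : Int) ^ (s + 1).toNat * pvProd (xs ++ [c]) (s + 1) := rfl
      _ = (x.toNat : Int) ^ (s + 1).toNat *
            (pvProd xs (s + 1) * (c.toNat : Int) ^ (s + 1 + (xs.length : Int) + 1).toNat) := by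
          rw [ih (s + 1) (by omega)]
      _ = pvProd (x :: xs) s * (c.toNat : Int) ^ (s + ((x :: xs).length : Int) + 1).toNat := by
          rw [h2]
          show _ = (x.toNat : Int) ^ (s + 1).toNat * pvProd xs (s + 1) * _
          ring

-- Exact (no-mod) version of B's inner loop.
def pvBexact (l : List Char) (p a : Int) : Int :=
  match l with
  | [] => a
  | c :: l => pvBexact l (p * (c.toNat : Int)) (a * (p * (c.toNat : Int)))

-- B's exact inner loop computes a * p^|l| * pvProd l.reverse 0.
lemma pv_Bexact_eq (l : List Char) : ∀ (p a : Int),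
    pvBexact l p a = a * p ^ l.length * pvProd l.reverse 0 := by
  induction l with
  | nil => intro p a; simp [pvBexact, pvProd]
  | cons c l ih =>
    intro p a
    rw [pvBexact, ih, List.reverse_cons, pv_prod_append c l.reverse 0 le_rfl]
    simp only [List.length_reverse, List.length_cons]
    have h3 : ((0 : Int) + (l.length : Int) + 1).toNat = l.length + 1 := by omega
    rw [h3]
    ring

-- B's modular inner loop tracks the exact one mod 2111379.
lemma pv_B_inner_mod (l : List Char) : ∀ (P A p a : Int), p = P % 2111379 → a = A % 2111379 →
    (l.foldl
      (fun st ch =>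
        let suf := PySem.Int.mod (st.1 * (ch.toNat : Int)) 2111379
        (suf, PySem.Int.mod (st.2 * suf) 2111379)) (p, a)).2
    = pvBexact l P A % 2111379 := by
  induction l with
  | nil => intro P A p a hp ha; simpa [pvBexact] using ha
  | cons c l ih =>
    intro P A p a hp ha
    subst hp; subst ha
    rw [List.foldl_cons, pvBexact]
    refine ih _ _ _ _ ?_ ?_
    · show PySem.Int.mod ((P % 2111379) * (c.toNat : Int)) 2111379
        = P * (c.toNat : Int) % 2111379
      rw [PySem.Int.mod_eq_emod_of_pos (by norm_num : (0:Int) < 2111379), pv_mml]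
    · show PySem.Int.mod ((A % 2111379) *
          (PySem.Int.mod ((P % 2111379) * (c.toNat : Int)) 2111379)) 2111379
        = A * (P * (c.toNat : Int)) % 2111379
      simp only [PySem.Int.mod_eq_emod_of_pos (by norm_num : (0:Int) < 2111379)]
      rw [pv_mml P (c.toNat : Int), pv_mmr, pv_mml]

-- B's inner loop equals A's inner product mod 2111379.
lemma pv_inner (bottle : String) :
    (bottle.toList.reverse.foldl
      (fun st ch =>
        let suf := PySem.Int.mod (st.1 * (ch.toNat : Int)) 2111379
        (suf, PySem.Int.mod (st.2 * suf) 2111379)) ((1:Int), (1:Int))).2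
    = ((PySem.List.enumerate bottle.toList).foldl
        (fun bottle_checksum p => bottle_checksum * (p.2.toNat : Int) ^ (p.1 + 1).toNat) 1) % 2111379 := by
  rw [pv_B_inner_mod bottle.toList.reverse 1 1 1 1 (by norm_num) (by norm_num),
      pv_Bexact_eq, List.reverse_reverse, pv_A_inner]
  simp

-- Outer loop: B's running modular sum equals A's exact sum mod 2111379.
lemma pv_outer (bs : List String) : ∀ (k t : Int), t = k % 2111379 →
    bs.foldl
      (fun total bottle =>
        PySem.Int.mod
          (total +
            (bottle.toList.reverse.foldl
              (fun st ch =>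
                let suf := PySem.Int.mod (st.1 * (ch.toNat : Int)) 2111379
                (suf, PySem.Int.mod (st.2 * suf) 2111379)) ((1:Int), (1:Int))).2)
          2111379) t
    = (bs.foldl
        (fun checksum bottle =>
          checksum +
            (PySem.List.enumerate bottle.toList).foldl
              (fun bottle_checksum p =>
                bottle_checksum * (p.2.toNat : Int) ^ (p.1 + 1).toNat) 1) k) % 2111379 := by
  induction bs with
  | nil => intro k t ht; simpa using ht
  | cons b bs ih =>
    intro k t ht
    rw [List.foldl_cons, List.foldl_cons]
    apply ih
    subst ht
    rw [pv_inner b, PySem.Int.mod_eq_emod_of_pos (by norm_num : (0:Int) < 2111379)]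
    conv_rhs => rw [Int.add_emod]

-- ===== VERDICT =====
theorem gen_checksum_spec : Claim_equal_gen_checksum := by
  intro bottles _
  unfold Spec_gen_checksum gen_checksum gen_checksum_alt
  rw [PySem.Int.mod_eq_emod_of_pos (by norm_num : (0:Int) < 2111379)]
  exact (pv_outer bottles 0 0 (by norm_num)).symm
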